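-- pv_equiv track=rewrite | github.com/Ayush12358/TempusLogic | codetext/code/python/p54-p60.py | p60_min_nodes_for_hbal
-- ===== SOURCE A (Python) =====
-- def p60_min_nodes_for_hbal(a):
--     if a == 0:
--         return 0
--     if a == 1:
--         return 1
--     b = 0
--     c = 1
--     for _ in range(2, a + 1):
--         d = c + b + 1
--         b = c
--         c = d
--     return c
-- ===== SOURCE B (Python) =====
-- def p60_min_nodes_for_hbal(a):
--     if a < 0:
--         return 0
--     def fib_pair(n):
--         # returns (F(n), F(n+1)) by fast doubling
--         if n == 0:
--             return (0, 1)
--         f, g = fib_pair(n >> 1)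
--         c = f * (2 * g - f)
--         d = f * f + g * g
--         if n & 1:
--             return (d, c + d)
--         return (c, d)
--     return fib_pair(a + 2)[0] - 1
-- ===== Notes on version B (the rewrite author's own statement) =====
-- stated objective: faster
-- what changed: Replaced the O(a) additive loop by fast-doubling Fibonacci (N(h)=Fib(h+2)-1), computing the answer in O(log a) multiplications.
-- intended difference: For negative a, A's loop never runs and it returns the leftover accumulator 1; B returns 0, the natural node count for a non-existent tree, which is the intended value. — e.g. on p60_min_nodes_for_hbal(-1): A returns 1, B returns 0
import Mathlib
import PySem

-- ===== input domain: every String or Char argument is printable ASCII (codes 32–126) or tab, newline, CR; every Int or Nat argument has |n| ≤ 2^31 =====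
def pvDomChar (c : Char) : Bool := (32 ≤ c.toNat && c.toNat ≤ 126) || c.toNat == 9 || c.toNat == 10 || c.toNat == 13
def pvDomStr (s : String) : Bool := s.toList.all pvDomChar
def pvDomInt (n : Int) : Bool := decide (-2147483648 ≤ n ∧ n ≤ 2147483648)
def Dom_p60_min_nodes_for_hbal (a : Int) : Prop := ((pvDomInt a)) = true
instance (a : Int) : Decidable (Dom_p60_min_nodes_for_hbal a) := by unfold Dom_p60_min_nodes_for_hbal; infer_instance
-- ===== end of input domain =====

-- B replaces A's O(a) additive loop by fast-doubling Fibonacci (N(h)=Fib(h+2)-1);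
-- on negative a (where A returns a leftover 1) B returns the intended 0 — see D_ below.


-- ===== PORT A =====
def p60_min_nodes_for_hbal (a : Int) : Int :=
  if a = 0 then 0
  else if a = 1 then 1
  else
    -- b = 0; c = 1; for _ in range(2, a+1): d = c+b+1; b = c; c = d
    let st := (PySem.List.pyRange 2 (a + 1) 1).foldl
      (fun (bc : Int × Int) _ => (bc.2, bc.2 + bc.1 + 1)) (0, 1)
    st.2

-- ===== PORT B =====
-- fib_pair n = (F(n), F(n+1)) by fast doubling (recursion on n/2, as in Source B)
def pvFibPair : Nat → Int × Int
  | 0 => (0, 1)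
  | (n + 1) =>
    let p := pvFibPair ((n + 1) / 2)
    let c := p.1 * (2 * p.2 - p.1)
    let d := p.1 * p.1 + p.2 * p.2
    if (n + 1) % 2 = 1 then (d, c + d) else (c, d)
decreasing_by omega

def p60_min_nodes_for_hbal_alt (a : Int) : Int :=
  if a < 0 then 0
  else (pvFibPair (a + 2).toNat).1 - 1

-- ===== PRECONDITION & SPEC =====
-- For negative a, A's loop never runs and it returns the leftover accumulator 1;
-- B returns 0, the natural node count for a non-existent tree, which is the intended value.
def D_p60_min_nodes_for_hbal (a : Int) : Prop := a < 0
instance (a : Int) : Decidable (D_p60_min_nodes_for_hbal a) := by unfold D_p60_min_nodes_for_hbal; infer_instance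
def Spec_p60_min_nodes_for_hbal (a : Int) (out : Int) : Prop :=
  ¬ D_p60_min_nodes_for_hbal a → out = p60_min_nodes_for_hbal_alt a
instance (a : Int) (out : Int) : Decidable (Spec_p60_min_nodes_for_hbal a out) := by
  unfold Spec_p60_min_nodes_for_hbal; infer_instance
def pvDiffWitness_p60_min_nodes_for_hbal : Int := (-1)
def pvDiffWitnessOut_p60_min_nodes_for_hbal : Int × Int := (1, 0)

-- ===== CLAIM (what is proved, stated in full; the proofs are below) =====
def Claim_unchanged_p60_min_nodes_for_hbal : Prop :=
  ∀ (a : Int), Dom_p60_min_nodes_for_hbal a → Spec_p60_min_nodes_for_hbal a (p60_min_nodes_for_hbal a)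
def Claim_changed_p60_min_nodes_for_hbal : Prop :=
  Dom_p60_min_nodes_for_hbal (pvDiffWitness_p60_min_nodes_for_hbal) ∧
  D_p60_min_nodes_for_hbal (pvDiffWitness_p60_min_nodes_for_hbal) ∧
  p60_min_nodes_for_hbal (pvDiffWitness_p60_min_nodes_for_hbal) = pvDiffWitnessOut_p60_min_nodes_for_hbal.1 ∧
  p60_min_nodes_for_hbal_alt (pvDiffWitness_p60_min_nodes_for_hbal) = pvDiffWitnessOut_p60_min_nodes_for_hbal.2 ∧
  pvDiffWitnessOut_p60_min_nodes_for_hbal.1 ≠ pvDiffWitnessOut_p60_min_nodes_for_hbal.2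
def Claim_exact_p60_min_nodes_for_hbal : Prop :=
  ∀ (a : Int), Dom_p60_min_nodes_for_hbal a → D_p60_min_nodes_for_hbal a →
    p60_min_nodes_for_hbal a ≠ p60_min_nodes_for_hbal_alt a

-- ===== LEMMAS AND PROOFS =====

-- fast doubling computes Fibonacci pairs
lemma pvFibPair_eq (n : Nat) : pvFibPair n = ((Nat.fib n : Int), (Nat.fib (n + 1) : Int)) := by
  induction n using Nat.strong_induction_on with
  | _ n ih =>
    match n with
    | 0 => simp [pvFibPair]
    | (m + 1) =>
      rw [pvFibPair, ih ((m + 1) / 2) (by omega)]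
      set k := (m + 1) / 2 with hkdef
      have hle : Nat.fib k ≤ 2 * Nat.fib (k + 1) :=
        le_trans Nat.fib_le_fib_succ (by omega)
      have hxy : (Nat.fib (2 * k) : Int)
          = (Nat.fib k : Int) * (2 * (Nat.fib (k + 1) : Int) - (Nat.fib k : Int)) := by
        have h := Nat.fib_two_mul k
        zify [hle] at h
        exact h
      have hxy1 : (Nat.fib (2 * k + 1) : Int)
          = (Nat.fib (k + 1) : Int) ^ 2 + (Nat.fib k : Int) ^ 2 := by
        exact_mod_cast congrArg (Nat.cast : Nat → Int) (Nat.fib_two_mul_add_one k)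
      rcases Nat.even_or_odd (m + 1) with he | ho
      · have h2 : (m + 1) % 2 = 0 := Nat.even_iff.mp he
        have h2k : m + 1 = 2 * k := by omega
        simp only [h2]
        rw [if_neg (by omega : ¬ (0 : Nat) = 1), Prod.mk.injEq]
        refine ⟨?_, ?_⟩
        · rw [h2k, hxy]
        · rw [show m + 1 + 1 = 2 * k + 1 from by omega, hxy1]; ring
      · have h2 : (m + 1) % 2 = 1 := Nat.odd_iff.mp ho
        have h2k : m + 1 = 2 * k + 1 := by omega
        simp only [h2, if_pos]
        rw [Prod.mk.injEq]
        refine ⟨?_, ?_⟩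
        · rw [h2k, hxy1]; ring
        · rw [show m + 1 + 1 = (2 * k) + 2 from by omega, Nat.fib_add_two]
          push_cast [hxy, hxy1]
          ring

-- A's loop, run up to n (n ≥ 2), yields (Fib(n+1)-1, Fib(n+2)-1)
lemma pvLoopA_eq (n : Nat) (hn : 2 ≤ n) :
    (PySem.List.pyRange 2 ((n : Int) + 1) 1).foldl
      (fun (bc : Int × Int) _ => (bc.2, bc.2 + bc.1 + 1)) (0, 1)
    = ((Nat.fib (n + 1) : Int) - 1, (Nat.fib (n + 2) : Int) - 1) := by
  induction n with
  | zero => omega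
  | succ m ih =>
    rcases Nat.lt_or_ge m 2 with hm | hm
    · interval_cases m
      · omega
      · norm_num [PySem.List.pyRange_one_singleton, Nat.fib]
        decide
    · have hsplit : PySem.List.pyRange 2 ((↑(m + 1) : Int) + 1) 1
          = PySem.List.pyRange 2 ((m : Int) + 1) 1 ++ [(m : Int) + 1] := by
        have := PySem.List.pyRange_one_succ_right (a := 2) (b := (m : Int) + 1) (by omega)
        push_cast at this ⊢
        convert this using 2
      rw [hsplit, List.foldl_append, ih hm]
      simp only [List.foldl_cons, List.foldl_nil]
      have h1 : Nat.fib (m + 1 + 2) = Nat.fib (m + 1) + Nat.fib (m + 1 + 1) :=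
        Nat.fib_add_two
      rw [Prod.mk.injEq]
      refine ⟨rfl, ?_⟩
      rw [h1]
      push_cast
      ring

-- closed form for A on nonnegative inputs
lemma pvA_eq_fib (a : Int) (ha : 0 ≤ a) :
    p60_min_nodes_for_hbal a = (Nat.fib (a.toNat + 2) : Int) - 1 := by
  unfold p60_min_nodes_for_hbal
  rcases eq_or_lt_of_le ha with h0 | hpos
  · simp [← h0]
  rcases eq_or_lt_of_le (by omega : (1 : Int) ≤ a) with h1 | h2
  · simp [← h1]
    decide
  · have hne0 : a ≠ 0 := by omega
    have hne1 : a ≠ 1 := by omega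
    rw [if_neg hne0, if_neg hne1]
    have hn : a = ((a.toNat : Int)) := by omega
    have h2n : 2 ≤ a.toNat := by omega
    have := pvLoopA_eq a.toNat h2n
    rw [hn, this]
    rfl

-- ===== VERDICT (by name: the statement is the Claim_ definition above) =====
theorem p60_min_nodes_for_hbal_spec : Claim_unchanged_p60_min_nodes_for_hbal := by
  intro a _ hD
  have ha : 0 ≤ a := by
    unfold D_p60_min_nodes_for_hbal at hD; omega
  rw [pvA_eq_fib a ha]
  unfold p60_min_nodes_for_hbal_alt
  rw [if_neg (by omega), pvFibPair_eq]
  have : (a + 2).toNat = a.toNat + 2 := by omega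
  rw [this]

theorem p60_min_nodes_for_hbal_changed : Claim_changed_p60_min_nodes_for_hbal := by
  unfold Claim_changed_p60_min_nodes_for_hbal; decide

theorem p60_min_nodes_for_hbal_tight : Claim_exact_p60_min_nodes_for_hbal := by
  intro a _ hD
  unfold D_p60_min_nodes_for_hbal at hD
  unfold p60_min_nodes_for_hbal p60_min_nodes_for_hbal_alt
  rw [if_neg (by omega), if_neg (by omega), if_pos hD]
  rw [PySem.List.pyRange_one_eq_nil (by omega)]
  simp
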